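-- pv_equiv track=rewrite | github.com/RadixSeven/3-body | three_body_simulator.py | _all_offsets_with_0
-- ===== SOURCE A (Python) =====
-- def _all_offsets_with_0(num_dimensions: int) -> list[list[int]]:
--     """
--     Same as all_offsets, but includes the [0, 0, ..., 0] offset.
--     """
--     offsets = [[]]
--     for i in range(num_dimensions):
--         minus1 = [[*offset, -1] for offset in offsets]
--         zero = [[*offset, 0] for offset in offsets]
--         plus1 = [[*offset, 1] for offset in offsets]
--         offsets = minus1 + zero + plus1
--     return offsets
-- ===== SOURCE B (Python) =====
-- def _all_offsets_with_0(num_dimensions: int) -> list[list[int]]: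
--     """
--     Same as all_offsets, but includes the [0, 0, ..., 0] offset.
--     """
--     if num_dimensions <= 0:
--         return [[]]
--     return [
--         [(k // 3 ** d) % 3 - 1 for d in range(num_dimensions)]
--         for k in range(3 ** num_dimensions)
--     ]
-- ===== Notes on version B (the rewrite author's own statement) =====
-- stated objective: alternative
-- what changed: Replaces the incremental dimension-by-dimension tripling of a growing offset list with a direct indexed enumeration: vector k has entry ((k // 3**d) % 3) - 1 in dimension d, read off by base-3 digit extraction.
import Mathlib
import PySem

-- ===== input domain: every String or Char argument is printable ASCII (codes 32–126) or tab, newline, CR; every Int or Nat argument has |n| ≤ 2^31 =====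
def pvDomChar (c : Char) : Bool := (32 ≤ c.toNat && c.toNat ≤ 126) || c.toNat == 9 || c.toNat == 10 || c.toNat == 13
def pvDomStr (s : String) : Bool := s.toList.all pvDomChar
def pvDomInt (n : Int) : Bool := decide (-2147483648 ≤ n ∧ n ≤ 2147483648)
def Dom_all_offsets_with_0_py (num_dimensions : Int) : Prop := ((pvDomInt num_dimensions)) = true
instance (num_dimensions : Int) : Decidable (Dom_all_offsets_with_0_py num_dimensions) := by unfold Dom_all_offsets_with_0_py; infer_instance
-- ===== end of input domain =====

-- B enumerates the product space directly by base-3 digit extraction instead of A's incremental tripling (objective: alternative decomposition, same cost).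


-- ===== PORT A =====
def all_offsets_with_0_py (num_dimensions : Int) : List (List Int) :=
  (PySem.List.pyRange 0 num_dimensions 1).foldl
    (fun offsets _ =>
      offsets.map (fun o => o ++ [-1]) ++ offsets.map (fun o => o ++ [0]) ++ offsets.map (fun o => o ++ [1]))
    [[]]

-- ===== PORT B =====
-- '3 ** e' is ported as '(3 : Int) ^ e.toNat'; exact since the exponents (num_dimensions in the
-- positive branch, and d drawn from range(num_dimensions)) are nonnegative there.
def all_offsets_with_0_py_alt (num_dimensions : Int) : List (List Int) :=
  if num_dimensions ≤ 0 then [[]]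
  else
    (PySem.List.pyRange 0 ((3 : Int) ^ num_dimensions.toNat) 1).map
      (fun k => (PySem.List.pyRange 0 num_dimensions 1).map
        (fun d => PySem.Int.mod (PySem.Int.floordiv k ((3 : Int) ^ d.toNat)) 3 - 1))

-- ===== PRECONDITION & SPEC =====
def Spec_all_offsets_with_0_py (num_dimensions : Int) (out : List (List Int)) : Prop := out = all_offsets_with_0_py_alt num_dimensions
instance (num_dimensions : Int) (out : List (List Int)) : Decidable (Spec_all_offsets_with_0_py num_dimensions out) := by unfold Spec_all_offsets_with_0_py; infer_instance

-- ===== CLAIM (what is proved, stated in full; the proofs are below) =====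
def Claim_equal_all_offsets_with_0_py : Prop := ∀ (num_dimensions : Int), Dom_all_offsets_with_0_py num_dimensions → Spec_all_offsets_with_0_py num_dimensions (all_offsets_with_0_py num_dimensions)

-- ===== LEMMAS AND PROOFS =====

-- A's loop body
def pvStep (offsets : List (List Int)) : List (List Int) :=
  offsets.map (fun o => o ++ [-1]) ++ offsets.map (fun o => o ++ [0]) ++ offsets.map (fun o => o ++ [1])

-- digit-vector view used to relate the two ports
def pvVec (n k : Nat) : List Int :=
  (List.range n).map (fun d => ((k / 3 ^ d % 3 : Nat) : Int) - 1)

def pvAll (n : Nat) : List (List Int) :=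
  (List.range (3 ^ n)).map (pvVec n)

lemma pvVec_succ (n j k : Nat) (hj : j < 3) (hk : k < 3 ^ n) :
    pvVec (n + 1) (j * 3 ^ n + k) = pvVec n k ++ [(j : Int) - 1] := by
  unfold pvVec
  rw [List.range_succ, List.map_append]
  congr 1
  · apply List.map_congr_left
    intro d hd
    rw [List.mem_range] at hd
    congr 2
    have h3d : 0 < 3 ^ d := Nat.pow_pos (by norm_num)
    have hn' : 3 ^ n = 3 ^ (n - d - 1) * (3 ^ d * 3) := by
      rw [← pow_succ, ← pow_add]
      congr 1
      omega
    have hrw : j * 3 ^ n + k = k + j * 3 ^ (n - d - 1) * 3 * 3 ^ d := by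
      rw [hn']; ring
    rw [hrw, Nat.add_mul_div_right _ _ h3d, Nat.add_mul_mod_self_right]
  · simp only [List.map_cons, List.map_nil]
    congr 2
    rw [Nat.mul_comm j, Nat.mul_add_div (Nat.pow_pos (by norm_num)), Nat.div_eq_of_lt hk]
    simp [Nat.mod_eq_of_lt hj]

lemma pvAll_succ (n : Nat) : pvAll (n + 1) = pvStep (pvAll n) := by
  unfold pvAll pvStep
  have h3 : 3 ^ (n + 1) = 3 ^ n + (3 ^ n + 3 ^ n) := by ring
  rw [h3, List.range_add, List.range_add]
  simp only [List.map_append, List.map_map, List.append_assoc]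
  congr 1
  · apply List.map_congr_left
    intro k hk
    rw [List.mem_range] at hk
    have := pvVec_succ n 0 k (by norm_num) hk
    simpa [Function.comp] using this
  congr 1
  · apply List.map_congr_left
    intro k hk
    rw [List.mem_range] at hk
    have := pvVec_succ n 1 k (by norm_num) hk
    simp only [Function.comp]
    rw [show 3 ^ n + k = 1 * 3 ^ n + k by ring, this]
    norm_num
  · apply List.map_congr_left
    intro k hk
    rw [List.mem_range] at hk
    have := pvVec_succ n 2 k (by norm_num) hk
    simp only [Function.comp]
    rw [show 3 ^ n + (3 ^ n + k) = 2 * 3 ^ n + k by ring, this]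
    norm_num

lemma portA_nat (n : Nat) : all_offsets_with_0_py (n : Int) = pvAll n := by
  induction n with
  | zero => simp [all_offsets_with_0_py, pvAll, pvVec, PySem.List.pyRange_one_eq_nil]
  | succ m ih =>
    unfold all_offsets_with_0_py at *
    rw [show ((m + 1 : Nat) : Int) = (m : Int) + 1 by push_cast; ring,
      PySem.List.pyRange_one_succ_right (by positivity), List.foldl_append]
    rw [ih, pvAll_succ]
    rfl

lemma portB_nat (n : Nat) : all_offsets_with_0_py_alt (n : Int) = pvAll n := by
  unfold all_offsets_with_0_py_alt
  by_cases h : (n : Int) ≤ 0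
  · have : n = 0 := by omega
    subst this
    simp [pvAll, pvVec]
  · rw [if_neg h, Int.toNat_natCast,
      show ((3 : Int) ^ n) = ((3 ^ n : Nat) : Int) by push_cast; ring]
    simp only [PySem.List.pyRange_zero_nat, List.map_map]
    unfold pvAll
    apply List.map_congr_left
    intro k _
    simp only [Function.comp]
    unfold pvVec
    apply List.map_congr_left
    intro d _
    simp only [Function.comp, Int.toNat_natCast]
    rw [show ((3 : Int) ^ d) = ((3 ^ d : Nat) : Int) by push_cast; ring,
      PySem.Int.floordiv_natCast, show ((3 : Int)) = ((3 : Nat) : Int) by norm_num,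
      PySem.Int.mod_natCast]

lemma portA_neg (n : Int) (h : n ≤ 0) : all_offsets_with_0_py n = [[]] := by
  simp [all_offsets_with_0_py, PySem.List.pyRange_one_eq_nil h]

-- ===== VERDICT (by name: the statement is the Claim_ definition above) =====
theorem all_offsets_with_0_py_spec : Claim_equal_all_offsets_with_0_py := by
  intro n _
  unfold Spec_all_offsets_with_0_py
  by_cases h : n ≤ 0
  · rw [portA_neg n h]
    unfold all_offsets_with_0_py_alt
    rw [if_pos h]
  · have hn : n = ((n.toNat : Nat) : Int) := by omega
    rw [hn, portA_nat, portB_nat]
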